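-- pv_equiv track=rewrite | github.com/Klavis-AI/klavis | mcp_servers/google_cloud_toolathlon/src/server.py | _matches_allowed_pattern
-- ===== SOURCE A (Python) =====
-- from typing import List, Dict, Any, Optional, Set
--
-- def _matches_allowed_pattern(resource_name: str, allowed_set: Set[str]) -> bool:
--     """
--     Check if a resource name matches any pattern in the allowed set.
--     Supports wildcard prefix matching with '*' suffix (e.g., 'prefix*' matches 'prefix-anything').
--
--     Args:
--         resource_name: The resource name to check
--         allowed_set: Set of allowed patterns (can include wildcards like 'prefix*')
--
--     Returns:
--         True if resource matches any allowed pattern, False otherwise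
--     """
--     if not allowed_set:
--         return True  # No restrictions if not configured
--
--     for pattern in allowed_set:
--         # Check for wildcard prefix pattern
--         if pattern.endswith('*'):
--             prefix = pattern[:-1]  # Remove the '*'
--             if resource_name.startswith(prefix):
--                 return True
--         # Exact match
--         elif resource_name == pattern:
--             return True
--
--     return False
-- ===== SOURCE B (Python) =====
-- def _matches_allowed_pattern(resource_name: str, allowed_set) -> bool:
--     if not allowed_set:
--         return True  # No restrictions if not configured
--     patterns = set(allowed_set)
--     # Exact match: the name itself is an allowed pattern.
--     if resource_name in patterns:
--         return True
--     # Wildcard match: a pattern 'q*' matches iff q is a prefix of the name, so only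
--     # prefixes of the name whose length is len(pattern)-1 for some wildcard pattern
--     # can match; look each such '<prefix>*' up in the set.
--     lengths = {len(p) - 1 for p in patterns if p.endswith('*')}
--     return any(i <= len(resource_name) and resource_name[:i] + '*' in patterns
--                for i in lengths)
-- ===== Notes on version B (the rewrite author's own statement) =====
-- stated objective: alternative
-- what changed: Inverts the search direction: instead of testing the name against each pattern, B builds a set of the patterns, collects the lengths of the wildcard patterns' prefixes, and decides by set-membership lookups of the name itself and of '<prefix of the name>*' for each collected length.
import Mathlib
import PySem

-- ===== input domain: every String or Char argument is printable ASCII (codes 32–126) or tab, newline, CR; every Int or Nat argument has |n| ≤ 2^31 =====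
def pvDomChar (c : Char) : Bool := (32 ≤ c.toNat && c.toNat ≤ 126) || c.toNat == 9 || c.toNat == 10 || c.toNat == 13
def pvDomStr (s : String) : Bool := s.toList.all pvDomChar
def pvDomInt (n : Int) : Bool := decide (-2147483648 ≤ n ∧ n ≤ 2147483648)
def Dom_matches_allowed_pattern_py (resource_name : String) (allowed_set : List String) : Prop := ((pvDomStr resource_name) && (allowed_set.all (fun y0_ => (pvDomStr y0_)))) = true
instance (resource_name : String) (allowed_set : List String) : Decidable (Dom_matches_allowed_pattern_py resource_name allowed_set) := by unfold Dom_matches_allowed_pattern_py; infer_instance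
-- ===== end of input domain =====

-- B inverts the search: instead of testing the name against each pattern, it puts the
-- patterns in a set, collects the wildcard prefix lengths, and looks the name and each
-- candidate '<prefix>*' up by set membership (alternative decomposition, same cost).

-- ===== PORT A =====
-- the 'for pattern in allowed_set' loop of A (early return on a match)
def pvLoopA (resource_name : String) : List String → Bool
  | [] => false
  | pattern :: rest =>
    if PySem.Str.endswith pattern "*" then
      let pre := PySem.Str.slice pattern none (some (-1))
      if PySem.Str.startswith resource_name pre then true
      else pvLoopA resource_name rest
    else if resource_name == pattern then true
    else pvLoopA resource_name rest

def matches_allowed_pattern_py (resource_name : String) (allowed_set : List String) : Bool :=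
  if allowed_set = [] then true
  else pvLoopA resource_name allowed_set

-- ===== PORT B =====
def matches_allowed_pattern_py_alt (resource_name : String) (allowed_set : List String) : Bool :=
  if allowed_set = [] then true
  else
    let patterns : PySem.Set String := PySem.Set.ofList allowed_set
    if PySem.Set.contains patterns resource_name then true
    else
      -- lengths = {len(p) - 1 for p in patterns if p.endswith('*')}
      let lengths : PySem.Set Int :=
        PySem.Set.ofList ((patterns.filter
          (fun p => PySem.Str.endswith p "*")).map
            (fun p => (PySem.Str.len p : Int) - 1))
      -- any(i <= len(resource_name) and resource_name[:i] + '*' in patterns for i in lengths)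
      lengths.any (fun i =>
        decide (i ≤ (PySem.Str.len resource_name : Int)) &&
          PySem.Set.contains patterns
            (String.ofList ((PySem.Str.slice resource_name none (some i)).toList ++ ['*'])))

-- ===== PRECONDITION & SPEC =====
def Spec_matches_allowed_pattern_py (resource_name : String) (allowed_set : List String) (out : Bool) : Prop := out = matches_allowed_pattern_py_alt resource_name allowed_set
instance (resource_name : String) (allowed_set : List String) (out : Bool) : Decidable (Spec_matches_allowed_pattern_py resource_name allowed_set out) := by unfold Spec_matches_allowed_pattern_py; infer_instance

-- ===== CLAIM (what is proved, stated in full; the proofs are below) =====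
def Claim_equal_matches_allowed_pattern_py : Prop := ∀ (resource_name : String) (allowed_set : List String), Dom_matches_allowed_pattern_py resource_name allowed_set → Spec_matches_allowed_pattern_py resource_name allowed_set (matches_allowed_pattern_py resource_name allowed_set)

-- ===== LEMMAS AND PROOFS =====

-- A's loop returns true iff some pattern of the list matches (wildcard or exact)
theorem pvLoopA_iff (rn : String) (s : List String) :
    pvLoopA rn s = true ↔
      ∃ p ∈ s,
        (if PySem.Str.endswith p "*" then
          PySem.Str.startswith rn (PySem.Str.slice p none (some (-1)))
        else rn == p) = true := by
  induction s with
  | nil => simp [pvLoopA]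
  | cons pattern rest ih =>
    rw [List.exists_mem_cons_iff]
    simp only [pvLoopA]
    split_ifs with h hs he <;> simp_all

-- a pattern ending in '*' is its stripped prefix plus '*'
theorem pvSplitStar (p : String) (h : PySem.Str.endswith p "*" = true) :
    (PySem.Str.slice p none (some (-1))).toList ++ ['*'] = p.toList := by
  have hsuf : ['*'] <:+ p.toList := by
    have := PySem.Chars.endswith_iff (s := p.toList) (p := ['*'])
    simpa using this.mp (by simpa using h)
  obtain ⟨t, ht⟩ := hsuf
  simp only [PySem.Str.toList_slice, PySem.Chars.slice_eq_listSlice,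
    PySem.List.slice_to_neg_one]
  rw [← ht, List.dropLast_concat]

-- ===== VERDICT (by name: the statement is the Claim_ definition above) =====
theorem matches_allowed_pattern_py_spec : Claim_equal_matches_allowed_pattern_py := by
  intro rn s _
  unfold Spec_matches_allowed_pattern_py matches_allowed_pattern_py matches_allowed_pattern_py_alt
  by_cases hnil : s = []
  · simp [hnil]
  · rw [if_neg hnil, if_neg hnil]
    by_cases hmem : PySem.Set.contains (PySem.Set.ofList s) rn = true
    · -- exact hit in B; show A's loop also succeeds on the pattern rn itself
      have hrn : rn ∈ s := (PySem.Set.mem_ofList _ _).mp ((PySem.Set.contains_iff _ _).mp hmem)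
      rw [if_pos hmem]
      rw [pvLoopA_iff]
      refine ⟨rn, hrn, ?_⟩
      by_cases h : PySem.Str.endswith rn "*" = true
      · rw [if_pos h, PySem.Str.startswith_eq]
        apply (PySem.Chars.startswith_iff _ _).mpr
        simp only [PySem.Str.toList_slice, PySem.Chars.slice_eq_listSlice,
          PySem.List.slice_to_neg_one]
        exact List.dropLast_prefix _
      · rw [if_neg h]
        exact beq_self_eq_true rn
    · rw [if_neg hmem]
      apply Bool.coe_iff_coe.mp
      rw [pvLoopA_iff, List.any_eq_true]
      constructor
      · rintro ⟨p, hp, hmatch⟩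
        by_cases h : PySem.Str.endswith p "*" = true
        · -- wildcard pattern p = q*, rn starts with q: take i = |q|
          rw [if_pos h] at hmatch
          set q := PySem.Str.slice p none (some (-1)) with hq
          have hpre : q.toList <+: rn.toList := by
            have := PySem.Chars.startswith_iff (s := rn.toList) (p := q.toList)
            simpa using this.mp (by simpa using hmatch)
          have hlen : q.toList.length ≤ rn.toList.length := hpre.length_le
          have hsplit : q.toList ++ ['*'] = p.toList := pvSplitStar p h
          refine ⟨(q.toList.length : Int), ?_, ?_⟩
          · -- |q| = len(p) - 1 is one of the collected wildcard lengths
            rw [PySem.Set.mem_ofList, List.mem_map]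
            refine ⟨p, ?_, ?_⟩
            · rw [List.mem_filter]
              exact ⟨(PySem.Set.mem_ofList _ _).mpr hp, h⟩
            · rw [PySem.Str.len_eq, ← hsplit]
              simp
          · rw [Bool.and_eq_true]
            constructor
            · rw [PySem.Str.len_eq]
              exact decide_eq_true (by exact_mod_cast hlen)
            have htake : (PySem.Str.slice rn none (some (q.toList.length : Int))).toList
                = q.toList := by
              simp only [PySem.Str.toList_slice, PySem.Chars.slice_eq_listSlice,
                PySem.List.slice_to_natCast]
              exact (List.prefix_iff_eq_take.mp hpre).symm
            rw [PySem.Set.contains_iff, PySem.Set.mem_ofList, htake, hsplit,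
              String.ofList_toList]
            exact hp
        · -- exact pattern: rn = p, contradicting hmem
          rw [if_neg h] at hmatch
          exfalso
          apply hmem
          rw [PySem.Set.contains_iff, PySem.Set.mem_ofList]
          exact (beq_iff_eq.mp hmatch) ▸ hp
      · rintro ⟨i, hi, hin⟩
        rw [Bool.and_eq_true] at hin
        -- i = len(p0) - 1 for a wildcard pattern p0, hence 0 ≤ i
        have hnn : 0 ≤ i := by
          rw [PySem.Set.mem_ofList, List.mem_map] at hi
          obtain ⟨p0, hp0f, hp0i⟩ := hi
          rw [List.mem_filter] at hp0f
          have : ['*'] <:+ p0.toList := by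
            have := PySem.Chars.endswith_iff p0.toList ['*']
            simpa using this.mp (by simpa using hp0f.2)
          obtain ⟨t, ht⟩ := this
          rw [← hp0i, PySem.Str.len_eq, ← ht]
          simp
        replace hin := hin.2
        set p := String.ofList ((PySem.Str.slice rn none (some i)).toList ++ ['*']) with hp
        have hpl : p.toList = (PySem.Str.slice rn none (some i)).toList ++ ['*'] :=
          String.toList_ofList
        have hpmem : p ∈ s := (PySem.Set.mem_ofList _ _).mp ((PySem.Set.contains_iff _ _).mp hin)
        refine ⟨p, hpmem, ?_⟩
        have hend : PySem.Str.endswith p "*" = true := by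
          rw [PySem.Str.endswith_eq]
          apply (PySem.Chars.endswith_iff _ _).mpr
          simp [hpl]
        rw [if_pos hend, PySem.Str.startswith_eq]
        apply (PySem.Chars.startswith_iff _ _).mpr
        have : (PySem.Str.slice p none (some (-1))).toList
            = (PySem.Str.slice rn none (some i)).toList := by
          simp only [PySem.Str.toList_slice, PySem.Chars.slice_eq_listSlice] at hpl ⊢
          rw [show (PySem.List.slice p.toList none (some (-1)))
              = p.toList.dropLast from PySem.List.slice_to_neg_one _]
          rw [hpl, List.dropLast_concat]
        rw [this]
        simp only [PySem.Str.toList_slice, PySem.Chars.slice_eq_listSlice,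
          PySem.List.slice_to _ hnn]
        exact List.take_prefix _ _
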